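-- pv_equiv track=rewrite | github.com/yasen-sotirov/TOOLS_ | 12_HACATHON/solution/dict_functions.py | aggregate_min
-- ===== SOURCE A (Python) =====
-- def aggregate_min(data):
--     my_dict = {}
--     for k, v in data:
--         if k in my_dict:
--             my_dict[k] = min(my_dict[k], v)
--         else:
--             my_dict[k] = v
--
--     return my_dict
-- ===== SOURCE B (Python) =====
-- def aggregate_min(data):
--     groups = {}
--     for k, v in data:
--         groups.setdefault(k, []).append(v)
--     return {k: min(vs) for k, vs in groups.items()}
-- ===== Notes on version B (the rewrite author's own statement) =====
-- stated objective: idiomatic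
-- what changed: B groups all values per key into lists in one pass (setdefault/append) and then reduces each list with min in a dict comprehension, instead of maintaining a running per-key minimum inline.
import Mathlib
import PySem

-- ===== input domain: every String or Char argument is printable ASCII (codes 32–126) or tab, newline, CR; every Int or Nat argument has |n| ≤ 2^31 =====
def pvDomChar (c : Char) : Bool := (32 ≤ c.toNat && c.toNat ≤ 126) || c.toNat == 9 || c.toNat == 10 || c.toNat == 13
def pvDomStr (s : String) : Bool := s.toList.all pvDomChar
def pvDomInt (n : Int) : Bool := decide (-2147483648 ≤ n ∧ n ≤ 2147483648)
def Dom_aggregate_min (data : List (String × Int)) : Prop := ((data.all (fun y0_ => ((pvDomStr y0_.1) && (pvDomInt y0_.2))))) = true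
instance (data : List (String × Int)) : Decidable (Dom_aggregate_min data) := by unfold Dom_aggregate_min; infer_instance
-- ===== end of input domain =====

-- B groups all values per key into lists in one pass, then takes min of each list; same result, different decomposition.

-- ===== PORT A =====
-- running per-key minimum in a dict: if k in my_dict: my_dict[k] = min(my_dict[k], v) else my_dict[k] = v
def aggregate_min (data : List (String × Int)) : List (String × Int) :=
  (data.foldl (fun d p =>
      if d.contains p.1 then d.insert p.1 (min (d.getD p.1 0) p.2)
      else d.insert p.1 p.2)
    PySem.Dict.empty).items

-- ===== PORT B =====
-- min(vs) for a NONEMPTY list vs (the only way B calls it); default 0 is never used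
def pymin (vs : List Int) : Int := (PySem.List.min? vs (fun y => y)).getD 0

def aggregate_min_alt (data : List (String × Int)) : List (String × Int) :=
  let groups := data.foldl (fun d p => d.modify p.1 [] (fun l => l ++ [p.2])) PySem.Dict.empty
  (groups.items.foldl (fun d p => d.insert p.1 (pymin p.2)) PySem.Dict.empty).items

-- ===== PRECONDITION & SPEC =====
def Spec_aggregate_min (data : List (String × Int)) (out : List (String × Int)) : Prop := out = aggregate_min_alt data
instance (data : List (String × Int)) (out : List (String × Int)) : Decidable (Spec_aggregate_min data out) := by unfold Spec_aggregate_min; infer_instance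

-- ===== CLAIM (what is proved, stated in full; the proofs are below) =====
def Claim_equal_aggregate_min : Prop := ∀ (data : List (String × Int)), Dom_aggregate_min data → Spec_aggregate_min data (aggregate_min data)

-- ===== LEMMAS AND PROOFS =====

-- the values paired with key k, in order
def pvVals (k : String) (l : List (String × Int)) : List Int :=
  (l.filter (fun p => p.1 == k)).map Prod.snd

-- combined running minimum over an optional seed and a list (shape of A's per-key state)
def pvMFold : Option Int → List Int → Option Int
  | none, [] => none
  | none, v :: vs => some (vs.foldl min v)
  | some m, vs => some (vs.foldl min m)

lemma stepA_eq (d : PySem.Dict String Int) (p : String × Int) :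
    (if d.contains p.1 then d.insert p.1 (min (d.getD p.1 0) p.2) else d.insert p.1 p.2)
    = d.insert p.1 (if d.contains p.1 then min (d.getD p.1 0) p.2 else p.2) := by
  split_ifs <;> rfl

lemma foldA_get? (l : List (String × Int)) (d : PySem.Dict String Int) (k : String) :
    (l.foldl (fun d p =>
        if d.contains p.1 then d.insert p.1 (min (d.getD p.1 0) p.2)
        else d.insert p.1 p.2) d).get? k = pvMFold (d.get? k) (pvVals k l) := by
  induction l generalizing d with
  | nil =>
    cases h : d.get? k <;> simp [pvVals, pvMFold, h]
  | cons p rest ih =>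
    rw [List.foldl_cons, ih, stepA_eq]
    by_cases hk : k = p.1
    · subst hk
      have hv : pvVals p.1 (p :: rest) = p.2 :: pvVals p.1 rest := by
        simp [pvVals]
      rw [hv, PySem.Dict.get?_insert]
      cases hd : d.get? p.1 with
      | none =>
        have hc : d.contains p.1 = false := by
          rw [PySem.Dict.contains_eq_isSome_get?, hd]; rfl
        simp [hc, pvMFold]
      | some m =>
        have hc : d.contains p.1 = true := by
          rw [PySem.Dict.contains_eq_isSome_get?, hd]; rfl
        have hg : d.getD p.1 0 = m := PySem.Dict.getD_of_get?_eq_some _ 0 hd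
        simp [hc, hg, pvMFold]
    · have hpk : (p.1 == k) = false := by
        simp only [beq_eq_false_iff_ne]; exact fun h => hk h.symm
      have hv : pvVals k (p :: rest) = pvVals k rest := by
        simp [pvVals, hpk]
      rw [hv, PySem.Dict.get?_insert]
      simp [hk]

def pvFoldA (data : List (String × Int)) : PySem.Dict String Int :=
  data.foldl (fun d p => d.insert p.1 (if d.contains p.1 then min (d.getD p.1 0) p.2 else p.2))
    PySem.Dict.empty

lemma aggA_eq (data : List (String × Int)) : aggregate_min data = (pvFoldA data).items := by
  unfold aggregate_min pvFoldA
  congr 1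
  congr 1
  funext d p
  exact stepA_eq d p

lemma vals_ne_nil {k : String} {data : List (String × Int)}
    (h : k ∈ data.map Prod.fst) : pvVals k data ≠ [] := by
  obtain ⟨p, hp, rfl⟩ := List.mem_map.mp h
  have : p.2 ∈ pvVals p.1 data := by
    simp only [pvVals, List.mem_map, List.mem_filter]
    exact ⟨p, ⟨hp, by simp⟩, rfl⟩
  exact fun hnil => by simp [hnil] at this

theorem aggregate_min_spec : Claim_equal_aggregate_min := by
  intro data _
  unfold Spec_aggregate_min aggregate_min_alt
  rw [aggA_eq]
  show (pvFoldA data).items =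
    (((data.foldl (fun d p => d.modify p.1 [] (fun l => l ++ [p.2]))
        PySem.Dict.empty).items.foldl (fun d p => d.insert p.1 (pymin p.2))
        PySem.Dict.empty).items)
  -- the grouping dict
  set g : PySem.Dict String (List Int) := data.foldl (fun d p => d.modify p.1 [] (fun l => l ++ [p.2])) PySem.Dict.empty with hg
  have nodA : (pvFoldA data).keys.Nodup :=
    PySem.Dict.nodup_keys_foldl_insert_key data Prod.fst _ _ PySem.Dict.nodup_keys_empty
  have nodG : g.keys.Nodup :=
    PySem.Dict.nodup_keys_foldl_modify_key data Prod.fst [] _ _ PySem.Dict.nodup_keys_empty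
  have keysA : (pvFoldA data).keys = PySem.Set.ofList (data.map Prod.fst) := by
    rw [pvFoldA, PySem.Dict.keys_foldl_insert_key, PySem.Dict.keys_empty, PySem.Set.update_nil_left]
  have keysG : g.keys = PySem.Set.ofList (data.map Prod.fst) := by
    rw [hg, PySem.Dict.keys_foldl_modify_key, PySem.Dict.keys_empty, PySem.Set.update_nil_left]
  have hfresh : ∀ p ∈ g.items, (PySem.Dict.empty : PySem.Dict String Int).contains p.1 = false := by
    intro p _; exact PySem.Dict.contains_empty p.1
  have hnodmap : (g.items.map Prod.fst).Nodup := nodG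
  rw [PySem.Dict.items_foldl_insert_fresh g.items Prod.fst (fun p => pymin p.2) PySem.Dict.empty hfresh hnodmap]
  rw [PySem.Dict.items_eq_map_keys g nodG [], PySem.Dict.items_eq_map_keys (pvFoldA data) nodA 0]
  rw [keysA, keysG]
  simp only [show (PySem.Dict.empty : PySem.Dict String Int).items = [] from rfl,
    List.nil_append, List.map_map]
  apply List.map_congr_left
  intro k hk
  simp only [Function.comp]
  congr 1
  -- per-key value: running min = min of collected list
  have hget : (pvFoldA data).get? k = pvMFold none (pvVals k data) := by
    rw [pvFoldA]
    have := foldA_get? data PySem.Dict.empty k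
    rw [PySem.Dict.get?_empty] at this
    rw [← this]
    congr 1
    congr 1
    funext d p
    exact (stepA_eq d p).symm
  have hgd : g.getD k [] = pvVals k data := by
    rw [hg, PySem.Dict.getD_foldl_modify_append, PySem.Dict.getD_empty]
    rfl
  have hne : pvVals k data ≠ [] := vals_ne_nil ((PySem.Set.mem_ofList _ _).mp hk)
  rw [PySem.Dict.getD_eq_get?_getD, hget, hgd]
  obtain ⟨v, vs, hvv⟩ := List.exists_cons_of_ne_nil hne
  rw [hvv]
  simp [pvMFold, pymin, PySem.List.min?_id_cons]
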